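-- pv_equiv track=rewrite | github.com/kuleshserega/crawlestate | jinja_filters.py | messages_alert_tags
-- ===== SOURCE A (Python) =====
-- def messages_alert_tags(value):
--     """
--         Get alerts class from alerts type
--     """
--     tags = [
--         ('error', 'danger'),
--         ('info', 'info'),
--         ('success', 'success'),
--         ('warning', 'warning'),
--         ('message', 'danger')
--     ]
--
--     for search, replace in tags:
--         value = value.replace(search, replace)
--
--     return value
-- ===== SOURCE B (Python) =====
-- import re
--
-- _MAP = {'error': 'danger', 'info': 'info', 'success': 'success',
--         'warning': 'warning', 'message': 'danger'}
-- _PAT = re.compile('error|info|success|warning|message')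
--
--
-- def messages_alert_tags(value):
--     return _PAT.sub(lambda m: _MAP[m.group(0)], value)
-- ===== Notes on version B (the rewrite author's own statement) =====
-- stated objective: alternative
-- what changed: Replaces five sequential full-string replace passes by a single left-to-right scan driven by a token-to-class lookup table (a compiled regex alternation with a dict lookup in the substitution callback).
-- outside the precondition, e.g. on messages_alert_tags('messagerror'): A returns 'messagdanger', B returns 'dangerrror'
import Mathlib
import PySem

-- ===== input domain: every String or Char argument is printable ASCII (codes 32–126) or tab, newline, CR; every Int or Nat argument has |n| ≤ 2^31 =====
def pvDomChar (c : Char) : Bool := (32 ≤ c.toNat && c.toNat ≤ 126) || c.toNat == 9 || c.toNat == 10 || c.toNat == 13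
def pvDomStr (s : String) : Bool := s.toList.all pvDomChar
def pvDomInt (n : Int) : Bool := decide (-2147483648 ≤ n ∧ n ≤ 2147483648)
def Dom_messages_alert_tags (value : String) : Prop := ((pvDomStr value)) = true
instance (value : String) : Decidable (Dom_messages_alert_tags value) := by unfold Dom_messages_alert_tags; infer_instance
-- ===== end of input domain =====

-- B replaces A's five sequential full-string replace passes by ONE left-to-right scan with a
-- token→class lookup table (regex-alternation style); objective: alternative single-pass algorithm.

-- ===== PORT A =====
def messages_alert_tags (value : String) : String :=
  let tags : List (String × String) :=
    [("error", "danger"), ("info", "info"), ("success", "success"),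
     ("warning", "warning"), ("message", "danger")]
  tags.foldl (fun v t => PySem.Str.replace v t.1 t.2) value

-- ===== PORT B =====
-- single left-to-right pass: at each position try the alternatives of the compiled pattern
-- 'error|info|success|warning|message' in order; on a match emit the table's replacement
-- (the dict lookup of Source B, inlined per matched token) and resume after the match.
def pvSub (l : List Char) : List Char :=
  match l with
  | [] => []
  | c :: t =>
    if "error".toList.isPrefixOf (c :: t) then "danger".toList ++ pvSub (t.drop 4)
    else if "info".toList.isPrefixOf (c :: t) then "info".toList ++ pvSub (t.drop 3)
    else if "success".toList.isPrefixOf (c :: t) then "success".toList ++ pvSub (t.drop 6)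
    else if "warning".toList.isPrefixOf (c :: t) then "warning".toList ++ pvSub (t.drop 6)
    else if "message".toList.isPrefixOf (c :: t) then "danger".toList ++ pvSub (t.drop 6)
    else c :: pvSub t
termination_by l.length
decreasing_by all_goals (simp; try omega)

def messages_alert_tags_alt (value : String) : String :=
  String.ofList (pvSub value.toList)

-- ===== PRECONDITION & SPEC =====
-- Pre_ excludes strings containing "messagerror": there two token occurrences overlap, A's
-- sequential passes replace the later-starting token while B's left-to-right scan replaces the
-- leftmost one — both results are defensible, neither is specified.
def Pre_messages_alert_tags (value : String) : Prop :=
  ¬ ("messagerror".toList <:+: value.toList)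
instance (value : String) : Decidable (Pre_messages_alert_tags value) := by
  unfold Pre_messages_alert_tags; infer_instance

def pvWitness_messages_alert_tags : String := "error: the message was a success"

def Spec_messages_alert_tags (value : String) (out : String) : Prop :=
  out = messages_alert_tags_alt value
instance (value : String) (out : String) : Decidable (Spec_messages_alert_tags value out) := by
  unfold Spec_messages_alert_tags; infer_instance

-- ===== CLAIM (what is proved, stated in full; the proofs are below) =====
def Claim_equal_messages_alert_tags : Prop :=
  ∀ (value : String), Dom_messages_alert_tags value → Pre_messages_alert_tags value →
    Spec_messages_alert_tags value (messages_alert_tags value)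

-- ===== LEMMAS AND PROOFS =====

-- One replace pass (Python str.replace with a fixed nonempty needle) as a plain scan.
def pvRep (old new : List Char) (l : List Char) : List Char :=
  match l with
  | [] => []
  | c :: t =>
    if old.isPrefixOf (c :: t) then new ++ pvRep old new (t.drop (old.length - 1))
    else c :: pvRep old new t
termination_by l.length
decreasing_by all_goals (simp; try omega)

theorem pvRep_go (old new : List Char) (hold : old ≠ []) :
    ∀ (fuel : Nat) (l acc : List Char), l.length ≤ fuel →
      PySem.Chars.replace.go old new fuel l acc = acc.reverse ++ pvRep old new l := by
  intro fuel
  induction fuel with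
  | zero =>
    intro l acc h
    have : l = [] := by cases l <;> simp_all
    subst this
    simp [PySem.Chars.replace.go, pvRep]
  | succ n ih =>
    intro l acc h
    match l with
    | [] => simp [PySem.Chars.replace.go, pvRep]
    | c :: t =>
      rw [PySem.Chars.replace.go]
      by_cases hp : old.isPrefixOf (c :: t)
      · rw [if_pos hp]
        have hdrop : List.drop old.length (c :: t) = t.drop (old.length - 1) := by
          cases old with
          | nil => simp_all
          | cons o os => simp
        rw [hdrop, ih _ _ (by simp at h ⊢; omega)]
        rw [pvRep, if_pos hp]
        simp
      · rw [if_neg hp, ih _ _ (by simp at h ⊢; omega)]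
        rw [pvRep, if_neg hp]
        simp

theorem replace_eq_pvRep (l old new : List Char) (hold : old ≠ []) :
    PySem.Chars.replace l old new = pvRep old new l := by
  rw [PySem.Chars.replace]
  rw [if_neg (by simpa using hold)]
  simp [pvRep_go old new hold l.length l [] le_rfl]

-- replacing a nonempty token by itself is the identity
theorem pvRep_self (t : List Char) (ht : t ≠ []) :
    ∀ (n : Nat) (l : List Char), l.length ≤ n → pvRep t t l = l := by
  intro n
  induction n with
  | zero =>
    intro l h
    have : l = [] := by cases l <;> simp_all
    subst this; rw [pvRep]
  | succ n ih =>
    intro l h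
    match l with
    | [] => rw [pvRep]
    | c :: u =>
      rw [pvRep]
      by_cases hp : t.isPrefixOf (c :: u)
      · rw [if_pos hp]
        have heq := List.prefix_iff_eq_append.mp (List.isPrefixOf_iff_prefix.mp hp)
        have hdrop : u.drop (t.length - 1) = (c :: u).drop t.length := by
          cases t with
          | nil => simp_all
          | cons a as => simp
        rw [hdrop, ih _ (by
          have := List.length_drop (l := c :: u) (i := t.length)
          have ht1 : 1 ≤ t.length := by cases t <;> simp_all
          simp at h ⊢; omega)]
        exact heq
      · rw [if_neg hp, ih _ (by simp at h ⊢; omega)]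

theorem pvRep_append_self (c : Char) (os new r : List Char) :
    pvRep (c :: os) new ((c :: os) ++ r) = new ++ pvRep (c :: os) new r := by
  rw [List.cons_append, pvRep]
  rw [if_pos (List.isPrefixOf_iff_prefix.mpr ⟨r, by simp⟩)]
  have : (os ++ r).drop ((c :: os).length - 1) = r := by
    simp [List.drop_left (l₁ := os) (l₂ := r)]
  rw [this]

theorem pvRep_cons_ne (old new : List Char) (c : Char) (x : List Char)
    (h : ¬ old.isPrefixOf (c :: x)) :
    pvRep old new (c :: x) = c :: pvRep old new x := by
  rw [pvRep, if_neg h]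

theorem tlE : "error".toList = ['e','r','r','o','r'] := by simp
theorem tlI : "info".toList = ['i','n','f','o'] := by simp
theorem tlS : "success".toList = ['s','u','c','c','e','s','s'] := by simp
theorem tlW : "warning".toList = ['w','a','r','n','i','n','g'] := by simp
theorem tlM : "message".toList = ['m','e','s','s','a','g','e'] := by simp
theorem tlD : "danger".toList = ['d','a','n','g','e','r'] := by simp
theorem tlEM : "messagerror".toList = ['m','e','s','s','a','g','e','r','r','o','r'] := by simp

-- a prefix that contains no 'd' passes through the 'error'→'danger' pass untouched
theorem prefix_through_repE :
    ∀ (p : List Char), 'd' ∉ p → ∀ (y : List Char),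
      p <+: pvRep "error".toList "danger".toList y → p <+: y := by
  intro p
  induction p with
  | nil => intro _ y _; exact List.nil_prefix
  | cons a p' ih =>
    intro hd y h
    match y with
    | [] => rw [pvRep] at h; simp at h
    | c :: t =>
      rw [pvRep] at h
      by_cases hp : "error".toList.isPrefixOf (c :: t)
      · rw [if_pos hp] at h
        simp only [tlD, List.cons_append] at h
        rcases List.cons_prefix_cons.mp h with ⟨rfl, -⟩
        simp at hd
      · rw [if_neg hp] at h
        rcases List.cons_prefix_cons.mp h with ⟨rfl, h2⟩
        have hd' : 'd' ∉ p' := by simp at hd; tauto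
        exact List.cons_prefix_cons.mpr ⟨rfl, ih hd' t h2⟩

-- B-side step lemmas (one unfolding of the scan per matched alternative / unmatched char)
theorem stepSub_E (r : List Char) :
    pvSub ('e'::'r'::'r'::'o'::'r'::r) = 'd'::'a'::'n'::'g'::'e'::'r':: pvSub r := by
  rw [pvSub]; simp [tlE, tlD]
theorem stepSub_I (r : List Char) :
    pvSub ('i'::'n'::'f'::'o'::r) = 'i'::'n'::'f'::'o':: pvSub r := by
  rw [pvSub]; simp [tlE, tlI]
theorem stepSub_S (r : List Char) :
    pvSub ('s'::'u'::'c'::'c'::'e'::'s'::'s'::r) = 's'::'u'::'c'::'c'::'e'::'s'::'s':: pvSub r := by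
  rw [pvSub]; simp [tlE, tlI, tlS]
theorem stepSub_W (r : List Char) :
    pvSub ('w'::'a'::'r'::'n'::'i'::'n'::'g'::r) = 'w'::'a'::'r'::'n'::'i'::'n'::'g':: pvSub r := by
  rw [pvSub]; simp [tlE, tlI, tlS, tlW]
theorem stepSub_M (r : List Char) :
    pvSub ('m'::'e'::'s'::'s'::'a'::'g'::'e'::r) = 'd'::'a'::'n'::'g'::'e'::'r':: pvSub r := by
  rw [pvSub]; simp [tlE, tlI, tlS, tlW, tlM, tlD]
theorem stepSub_cons (c : Char) (t : List Char)
    (h1 : ¬ "error".toList.isPrefixOf (c :: t))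
    (h2 : ¬ "info".toList.isPrefixOf (c :: t))
    (h3 : ¬ "success".toList.isPrefixOf (c :: t))
    (h4 : ¬ "warning".toList.isPrefixOf (c :: t))
    (h5 : ¬ "message".toList.isPrefixOf (c :: t)) :
    pvSub (c :: t) = c :: pvSub t := by
  rw [pvSub, if_neg (by simpa using h1), if_neg (by simpa using h2),
      if_neg (by simpa using h3), if_neg (by simpa using h4), if_neg (by simpa using h5)]

-- A-side step lemmas: how each pass walks over the token heads
theorem repE_E (r : List Char) :
    pvRep "error".toList "danger".toList ('e'::'r'::'r'::'o'::'r'::r)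
      = 'd'::'a'::'n'::'g'::'e'::'r':: pvRep "error".toList "danger".toList r := by
  have := pvRep_append_self 'e' ['r','r','o','r'] "danger".toList r
  simpa [tlE, tlD] using this
theorem repM_M (r : List Char) :
    pvRep "message".toList "danger".toList ('m'::'e'::'s'::'s'::'a'::'g'::'e'::r)
      = 'd'::'a'::'n'::'g'::'e'::'r':: pvRep "message".toList "danger".toList r := by
  have := pvRep_append_self 'm' ['e','s','s','a','g','e'] "danger".toList r
  simpa [tlM, tlD] using this
theorem repM_D (x : List Char) :
    pvRep "message".toList "danger".toList ('d'::'a'::'n'::'g'::'e'::'r'::x)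
      = 'd'::'a'::'n'::'g'::'e'::'r':: pvRep "message".toList "danger".toList x := by
  rw [pvRep_cons_ne _ _ _ _ (by simp [tlM]), pvRep_cons_ne _ _ _ _ (by simp [tlM]),
      pvRep_cons_ne _ _ _ _ (by simp [tlM]), pvRep_cons_ne _ _ _ _ (by simp [tlM]),
      pvRep_cons_ne _ _ _ _ (by simp [tlM]), pvRep_cons_ne _ _ _ _ (by simp [tlM])]
theorem repE_I (x : List Char) :
    pvRep "error".toList "danger".toList ('i'::'n'::'f'::'o'::x)
      = 'i'::'n'::'f'::'o':: pvRep "error".toList "danger".toList x := by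
  rw [pvRep_cons_ne _ _ _ _ (by simp [tlE]), pvRep_cons_ne _ _ _ _ (by simp [tlE]),
      pvRep_cons_ne _ _ _ _ (by simp [tlE]), pvRep_cons_ne _ _ _ _ (by simp [tlE])]
theorem repM_I (x : List Char) :
    pvRep "message".toList "danger".toList ('i'::'n'::'f'::'o'::x)
      = 'i'::'n'::'f'::'o':: pvRep "message".toList "danger".toList x := by
  rw [pvRep_cons_ne _ _ _ _ (by simp [tlM]), pvRep_cons_ne _ _ _ _ (by simp [tlM]),
      pvRep_cons_ne _ _ _ _ (by simp [tlM]), pvRep_cons_ne _ _ _ _ (by simp [tlM])]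
theorem repE_S (x : List Char) :
    pvRep "error".toList "danger".toList ('s'::'u'::'c'::'c'::'e'::'s'::'s'::x)
      = 's'::'u'::'c'::'c'::'e'::'s'::'s':: pvRep "error".toList "danger".toList x := by
  rw [pvRep_cons_ne _ _ _ _ (by simp [tlE]), pvRep_cons_ne _ _ _ _ (by simp [tlE]),
      pvRep_cons_ne _ _ _ _ (by simp [tlE]), pvRep_cons_ne _ _ _ _ (by simp [tlE]),
      pvRep_cons_ne _ _ _ _ (by simp [tlE]), pvRep_cons_ne _ _ _ _ (by simp [tlE]),
      pvRep_cons_ne _ _ _ _ (by simp [tlE])]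
theorem repM_S (x : List Char) :
    pvRep "message".toList "danger".toList ('s'::'u'::'c'::'c'::'e'::'s'::'s'::x)
      = 's'::'u'::'c'::'c'::'e'::'s'::'s':: pvRep "message".toList "danger".toList x := by
  rw [pvRep_cons_ne _ _ _ _ (by simp [tlM]), pvRep_cons_ne _ _ _ _ (by simp [tlM]),
      pvRep_cons_ne _ _ _ _ (by simp [tlM]), pvRep_cons_ne _ _ _ _ (by simp [tlM]),
      pvRep_cons_ne _ _ _ _ (by simp [tlM]), pvRep_cons_ne _ _ _ _ (by simp [tlM]),
      pvRep_cons_ne _ _ _ _ (by simp [tlM])]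
theorem repE_W (x : List Char) :
    pvRep "error".toList "danger".toList ('w'::'a'::'r'::'n'::'i'::'n'::'g'::x)
      = 'w'::'a'::'r'::'n'::'i'::'n'::'g':: pvRep "error".toList "danger".toList x := by
  rw [pvRep_cons_ne _ _ _ _ (by simp [tlE]), pvRep_cons_ne _ _ _ _ (by simp [tlE]),
      pvRep_cons_ne _ _ _ _ (by simp [tlE]), pvRep_cons_ne _ _ _ _ (by simp [tlE]),
      pvRep_cons_ne _ _ _ _ (by simp [tlE]), pvRep_cons_ne _ _ _ _ (by simp [tlE]),
      pvRep_cons_ne _ _ _ _ (by simp [tlE])]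
theorem repM_W (x : List Char) :
    pvRep "message".toList "danger".toList ('w'::'a'::'r'::'n'::'i'::'n'::'g'::x)
      = 'w'::'a'::'r'::'n'::'i'::'n'::'g':: pvRep "message".toList "danger".toList x := by
  rw [pvRep_cons_ne _ _ _ _ (by simp [tlM]), pvRep_cons_ne _ _ _ _ (by simp [tlM]),
      pvRep_cons_ne _ _ _ _ (by simp [tlM]), pvRep_cons_ne _ _ _ _ (by simp [tlM]),
      pvRep_cons_ne _ _ _ _ (by simp [tlM]), pvRep_cons_ne _ _ _ _ (by simp [tlM]),
      pvRep_cons_ne _ _ _ _ (by simp [tlM])]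
theorem repE_M (r : List Char) (h : ¬ (['r','r','o','r'].isPrefixOf r = true)) :
    pvRep "error".toList "danger".toList ('m'::'e'::'s'::'s'::'a'::'g'::'e'::r)
      = 'm'::'e'::'s'::'s'::'a'::'g'::'e':: pvRep "error".toList "danger".toList r := by
  rw [pvRep_cons_ne _ _ _ _ (by simp [tlE]), pvRep_cons_ne _ _ _ _ (by simp [tlE]),
      pvRep_cons_ne _ _ _ _ (by simp [tlE]), pvRep_cons_ne _ _ _ _ (by simp [tlE]),
      pvRep_cons_ne _ _ _ _ (by simp [tlE]), pvRep_cons_ne _ _ _ _ (by simp [tlE]),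
      pvRep_cons_ne _ _ _ _ (by simp [tlE, h])]

-- main lemma: the single pass equals the 'error' pass followed by the 'message' pass
theorem pvSub_eq (n : Nat) :
    ∀ (l : List Char), l.length ≤ n → ¬ ("messagerror".toList <:+: l) →
      pvSub l = pvRep "message".toList "danger".toList
                  (pvRep "error".toList "danger".toList l) := by
  induction n with
  | zero =>
    intro l h _
    have : l = [] := by cases l <;> simp_all
    subst this
    rw [pvSub, pvRep, pvRep]
  | succ n ih =>
    intro l hl hinf
    by_cases hE : "error".toList.isPrefixOf l
    · obtain ⟨r, hr⟩ := List.isPrefixOf_iff_prefix.mp hE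
      have hlc : l = 'e'::'r'::'r'::'o'::'r'::r := by rw [← hr]; simp [tlE]
      subst hlc
      have hr' : r.length ≤ n := by simp at hl; omega
      have hinf' : ¬ ("messagerror".toList <:+: r) := fun hx =>
        hinf (hx.trans (List.suffix_cons _ _ |>.trans (List.suffix_cons _ _)
          |>.trans (List.suffix_cons _ _) |>.trans (List.suffix_cons _ _)
          |>.trans (List.suffix_cons _ _)).isInfix)
      rw [stepSub_E, repE_E, repM_D, ih r hr' hinf']
    · by_cases hI : "info".toList.isPrefixOf l
      · obtain ⟨r, hr⟩ := List.isPrefixOf_iff_prefix.mp hI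
        have hlc : l = 'i'::'n'::'f'::'o'::r := by rw [← hr]; simp [tlI]
        subst hlc
        have hr' : r.length ≤ n := by simp at hl; omega
        have hinf' : ¬ ("messagerror".toList <:+: r) := fun hx =>
          hinf (hx.trans (List.suffix_cons _ _ |>.trans (List.suffix_cons _ _)
            |>.trans (List.suffix_cons _ _) |>.trans (List.suffix_cons _ _)).isInfix)
        rw [stepSub_I, repE_I, repM_I, ih r hr' hinf']
      · by_cases hS : "success".toList.isPrefixOf l
        · obtain ⟨r, hr⟩ := List.isPrefixOf_iff_prefix.mp hS
          have hlc : l = 's'::'u'::'c'::'c'::'e'::'s'::'s'::r := by rw [← hr]; simp [tlS]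
          subst hlc
          have hr' : r.length ≤ n := by simp at hl; omega
          have hinf' : ¬ ("messagerror".toList <:+: r) := fun hx =>
            hinf (hx.trans (List.suffix_cons _ _ |>.trans (List.suffix_cons _ _)
              |>.trans (List.suffix_cons _ _) |>.trans (List.suffix_cons _ _)
              |>.trans (List.suffix_cons _ _) |>.trans (List.suffix_cons _ _)
              |>.trans (List.suffix_cons _ _)).isInfix)
          rw [stepSub_S, repE_S, repM_S, ih r hr' hinf']
        · by_cases hW : "warning".toList.isPrefixOf l
          · obtain ⟨r, hr⟩ := List.isPrefixOf_iff_prefix.mp hW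
            have hlc : l = 'w'::'a'::'r'::'n'::'i'::'n'::'g'::r := by rw [← hr]; simp [tlW]
            subst hlc
            have hr' : r.length ≤ n := by simp at hl; omega
            have hinf' : ¬ ("messagerror".toList <:+: r) := fun hx =>
              hinf (hx.trans (List.suffix_cons _ _ |>.trans (List.suffix_cons _ _)
                |>.trans (List.suffix_cons _ _) |>.trans (List.suffix_cons _ _)
                |>.trans (List.suffix_cons _ _) |>.trans (List.suffix_cons _ _)
                |>.trans (List.suffix_cons _ _)).isInfix)
            rw [stepSub_W, repE_W, repM_W, ih r hr' hinf']
          · by_cases hM : "message".toList.isPrefixOf l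
            · obtain ⟨r, hr⟩ := List.isPrefixOf_iff_prefix.mp hM
              have hlc : l = 'm'::'e'::'s'::'s'::'a'::'g'::'e'::r := by rw [← hr]; simp [tlM]
              subst hlc
              have hr' : r.length ≤ n := by simp at hl; omega
              have hinf' : ¬ ("messagerror".toList <:+: r) := fun hx =>
                hinf (hx.trans (List.suffix_cons _ _ |>.trans (List.suffix_cons _ _)
                  |>.trans (List.suffix_cons _ _) |>.trans (List.suffix_cons _ _)
                  |>.trans (List.suffix_cons _ _) |>.trans (List.suffix_cons _ _)
                  |>.trans (List.suffix_cons _ _)).isInfix)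
              have hrr : ¬ (['r','r','o','r'].isPrefixOf r = true) := by
                intro hp
                obtain ⟨r2, hr2⟩ := List.isPrefixOf_iff_prefix.mp hp
                apply hinf
                refine ⟨[], r2, ?_⟩
                rw [tlEM]
                simp [← hr2]
              rw [stepSub_M, repE_M r hrr, repM_M, ih r hr' hinf']
            · match l with
              | [] => rw [pvSub, pvRep, pvRep]
              | c :: t =>
                have ht : t.length ≤ n := by simp at hl; omega
                have hinf' : ¬ ("messagerror".toList <:+: t) := fun hx =>
                  hinf (hx.trans (List.suffix_cons _ _).isInfix)
                have hMc : ¬ "message".toList.isPrefixOf (c :: pvRep "error".toList "danger".toList t) := by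
                  intro hp
                  have hp' := List.isPrefixOf_iff_prefix.mp hp
                  rw [tlM] at hp'
                  rcases List.cons_prefix_cons.mp hp' with ⟨rfl, h2⟩
                  have h3 : ['e','s','s','a','g','e'] <+: t :=
                    prefix_through_repE ['e','s','s','a','g','e'] (by decide) t h2
                  exact hM (by
                    rw [tlM]
                    exact List.isPrefixOf_iff_prefix.mpr (List.cons_prefix_cons.mpr ⟨rfl, h3⟩))
                rw [stepSub_cons c t hE hI hS hW hM,
                    pvRep_cons_ne _ _ _ _ hE,
                    pvRep_cons_ne _ _ _ _ hMc,
                    ih t ht hinf']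

-- ===== VERDICT (by name: the statement is the Claim_ definition above) =====
theorem messages_alert_tags_spec : Claim_equal_messages_alert_tags := by
  intro value hdom hpre
  unfold Spec_messages_alert_tags messages_alert_tags messages_alert_tags_alt
  simp only [List.foldl]
  rw [PySem.Str.replace, PySem.Str.replace, PySem.Str.replace, PySem.Str.replace,
      PySem.Str.replace]
  simp only [String.toList_ofList]
  refine congrArg String.ofList ?_
  rw [replace_eq_pvRep _ _ _ (by simp), replace_eq_pvRep _ _ _ (by simp),
      replace_eq_pvRep _ _ _ (by simp), replace_eq_pvRep _ _ _ (by simp),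
      replace_eq_pvRep _ _ _ (by simp)]
  rw [pvRep_self "info".toList (by simp) _ _ le_rfl]
  rw [pvRep_self "success".toList (by simp) _ _ le_rfl]
  rw [pvRep_self "warning".toList (by simp) _ _ le_rfl]
  exact (pvSub_eq value.toList.length value.toList le_rfl hpre).symm
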